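-- pv_equiv track=rewrite | github.com/dhruvtpatel/2540_finalproj | code/functions/transformed_functions.py | nested_loop_checker_transformed
-- ===== SOURCE A (Python) =====
-- def nested_loop_checker_transformed(limit: int):
--     b_early = sum(1 for i in range(limit) for j in range(i)) % 200 == 36
--     counter = 0
--     for i in range(limit):
--         for j in range(i):
--             counter += 1
--     final = counter % 200
--     b_final = (final == 36)
--     assert b_early == b_final, "Early and final assertions are not equivalent"
--     return final
-- ===== SOURCE B (Python) =====
-- def nested_loop_checker_transformed(limit: int):
--     n = limit if limit > 0 else 0
--     return (n * (n - 1) // 2) % 200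
-- ===== Notes on version B (the rewrite author's own statement) =====
-- stated objective: faster
-- what changed: Replaces the O(n^2) nested counting loops (and the duplicated generator-sum assertion pass) with the closed-form triangular number n*(n-1)//2 mod 200.
import Mathlib
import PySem

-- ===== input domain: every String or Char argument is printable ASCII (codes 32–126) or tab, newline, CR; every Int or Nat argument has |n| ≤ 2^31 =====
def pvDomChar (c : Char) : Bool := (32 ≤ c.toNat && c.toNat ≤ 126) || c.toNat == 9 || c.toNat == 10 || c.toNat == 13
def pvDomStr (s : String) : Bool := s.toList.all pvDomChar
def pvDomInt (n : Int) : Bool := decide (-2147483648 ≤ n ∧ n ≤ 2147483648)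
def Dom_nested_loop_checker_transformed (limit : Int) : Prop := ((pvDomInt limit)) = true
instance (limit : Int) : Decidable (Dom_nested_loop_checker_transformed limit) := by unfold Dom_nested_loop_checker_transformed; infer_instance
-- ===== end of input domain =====

-- B replaces A's O(n^2) nested counting loops with the closed-form triangular number; faster (asymptotic).

-- ===== PORT A =====
-- A's assert compares the generator-sum pass with the loop pass; both expressions are
-- literally the same computation, so the assert can never fire and raises nothing.
def nested_loop_checker_transformed (limit : Int) : Int :=
  let b_early : Bool :=
    PySem.Int.mod ((PySem.List.pyRange 0 limit 1).foldl
      (fun s i => (PySem.List.pyRange 0 i 1).foldl (fun s _ => s + 1) s) 0) 200 == 36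
  let counter : Int := (PySem.List.pyRange 0 limit 1).foldl
      (fun c i => (PySem.List.pyRange 0 i 1).foldl (fun c _ => c + 1) c) 0
  let final : Int := PySem.Int.mod counter 200
  let b_final : Bool := final == 36
  let _assert_ok : Bool := b_early == b_final
  final

-- ===== PORT B =====
def nested_loop_checker_transformed_alt (limit : Int) : Int :=
  let n : Int := if limit > 0 then limit else 0
  PySem.Int.mod (PySem.Int.floordiv (n * (n - 1)) 2) 200

-- ===== PRECONDITION & SPEC =====
def Spec_nested_loop_checker_transformed (limit : Int) (out : Int) : Prop := out = nested_loop_checker_transformed_alt limit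
instance (limit : Int) (out : Int) : Decidable (Spec_nested_loop_checker_transformed limit out) := by unfold Spec_nested_loop_checker_transformed; infer_instance

-- ===== CLAIM (what is proved, stated in full; the proofs are below) =====
def Claim_equal_nested_loop_checker_transformed : Prop := ∀ (limit : Int), Dom_nested_loop_checker_transformed limit → Spec_nested_loop_checker_transformed limit (nested_loop_checker_transformed limit)

-- ===== LEMMAS AND PROOFS =====

-- the inner loop just adds the list's length
theorem pv_inner_count (l : List Int) (c : Int) :
    l.foldl (fun c _ => c + 1) c = c + l.length := by
  induction l generalizing c with
  | nil => simp
  | cons x xs ih => simp [List.foldl, ih]; ring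

-- the outer loop accumulates the triangular number
theorem pv_outer_count (n : ℕ) (acc : Int) :
    (PySem.List.pyRange 0 n 1).foldl
      (fun c i => (PySem.List.pyRange 0 i 1).foldl (fun c _ => c + 1) c) acc
    = acc + (n * (n - 1)) / 2 := by
  induction n generalizing acc with
  | zero => simp [PySem.List.pyRange_one_eq_nil]
  | succ m ih =>
    have h : (PySem.List.pyRange 0 ((m : Int) + 1) 1)
        = PySem.List.pyRange 0 (m : Int) 1 ++ [(m : Int)] :=
      PySem.List.pyRange_one_succ_right (by positivity)
    push_cast
    rw [h, List.foldl_append, ih]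
    simp [pv_inner_count, PySem.List.length_pyRange_one]
    have h2 : ((m : Int) * ((m : Int) - 1)) % 2 = 0 := by
      have he : Even ((m : Int) * ((m : Int) - 1)) := by
        have := Int.even_mul_succ_self ((m : Int) - 1)
        simpa [mul_comm] using this
      exact Int.even_iff.mp he
    have h3 : ((m : Int) + 1) * (m : Int)
        = (m : Int) * ((m : Int) - 1) + 2 * (m : Int) := by ring
    omega

theorem nested_loop_checker_transformed_eq (limit : Int) :
    nested_loop_checker_transformed limit = nested_loop_checker_transformed_alt limit := by
  unfold nested_loop_checker_transformed nested_loop_checker_transformed_alt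
  by_cases hp : limit > 0
  · obtain ⟨n, rfl⟩ : ∃ n : ℕ, limit = (n : Int) :=
      ⟨limit.toNat, (Int.toNat_of_nonneg (le_of_lt hp)).symm⟩
    simp only [hp, if_pos]
    rw [pv_outer_count n 0]
    have : PySem.Int.floordiv ((n : Int) * ((n : Int) - 1)) 2
        = ((n : Int) * ((n : Int) - 1)) / 2 :=
      PySem.Int.floordiv_eq_ediv_of_pos (by norm_num)
    rw [this]
    ring_nf
  · have hle : limit ≤ 0 := le_of_not_gt hp
    simp only [hp, PySem.List.pyRange_one_eq_nil hle]
    simp [PySem.Int.mod, PySem.Int.floordiv]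

-- ===== VERDICT (by name: the statement is the Claim_ definition above) =====
theorem nested_loop_checker_transformed_spec : Claim_equal_nested_loop_checker_transformed := by
  intro limit _
  exact nested_loop_checker_transformed_eq limit
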